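-- pv_equiv track=rewrite | github.com/Myhris-JS/University-Projects | PL/Semestr 1/Algorytmy i Struktury danych/Projekt/algorytmy.py | scriptIII
-- ===== SOURCE A (Python) =====
-- def scriptIII(data):
--     stops=0
--     previous=data[0][0]
--     default=lambda f: 0 if f<=4 else 5
--     for start,finish in data:
--         start_off=abs(start-previous)
--         finish_off=abs(finish-default(finish))
--         stops+=start_off+abs(start-finish)+finish_off
--
--         previous=default(finish)
--     return stops
-- ===== SOURCE B (Python) =====
-- def scriptIII(data):
--     def d(f):
--         return 0 if f <= 4 else 5
--
--     def cost(p, seg):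
--         # total offset cost of a nonempty segment whose incoming carried value is p
--         if len(seg) == 1:
--             s, f = seg[0]
--             return abs(s - p) + abs(s - f) + abs(f - d(f))
--         mid = len(seg) // 2
--         return cost(p, seg[:mid]) + cost(d(seg[mid - 1][1]), seg[mid:])
--
--     return cost(data[0][0], data)
-- ===== Notes on version B (the rewrite author's own statement) =====
-- stated objective: alternative
-- what changed: B computes the total by divide-and-conquer: it recursively splits the trip into halves and combines the halves' costs, the right half seeded with the default of the left half's last finish, instead of A's linear sweep threading a running `previous` accumulator.
import Mathlib
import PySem

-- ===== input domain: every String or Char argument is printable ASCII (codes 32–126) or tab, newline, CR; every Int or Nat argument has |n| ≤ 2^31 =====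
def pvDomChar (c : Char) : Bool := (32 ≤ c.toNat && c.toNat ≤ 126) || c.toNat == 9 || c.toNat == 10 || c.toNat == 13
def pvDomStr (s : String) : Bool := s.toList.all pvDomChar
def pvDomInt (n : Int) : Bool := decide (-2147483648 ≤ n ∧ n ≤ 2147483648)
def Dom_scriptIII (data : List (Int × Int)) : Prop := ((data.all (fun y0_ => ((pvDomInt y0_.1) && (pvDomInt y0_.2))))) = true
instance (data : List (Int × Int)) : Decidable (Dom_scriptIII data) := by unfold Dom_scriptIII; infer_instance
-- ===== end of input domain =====

-- B replaces A's linear accumulating sweep by a divide-and-conquer over segment halves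
-- (objective: alternative decomposition); return values agree on nonempty input (Pre_).

-- ===== PORT A =====
def scriptIII (data : List (Int × Int)) : Int :=
  match PySem.List.pyGet? data 0 with
  | none => 0   -- unreachable under Pre_scriptIII: Python raises IndexError at data[0][0]
  | some h =>
    (data.foldl
      (fun (st : Int × Int) (sf : Int × Int) =>
        let default : Int := if sf.2 ≤ 4 then 0 else 5
        let start_off := |sf.1 - st.2|
        let finish_off := |sf.2 - default|
        (st.1 + (start_off + |sf.1 - sf.2| + finish_off), default))
      ((0 : Int), h.1)).1

-- ===== PORT B =====
-- Source B's `cost(p, seg)`: divide-and-conquer on a segment. Python never reaches an empty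
-- segment (it would recurse forever there); the port returns 0 on [] to be total.
def pvCost (p : Int) (seg : List (Int × Int)) : Int :=
  if seg.length = 0 then 0
  else if seg.length = 1 then
    let sf := (PySem.List.pyGet? seg 0).getD (0, 0)
    |sf.1 - p| + |sf.1 - sf.2| + |sf.2 - (if sf.2 ≤ 4 then (0 : Int) else 5)|
  else
    let mid := seg.length / 2
    pvCost p (seg.take mid) +
      pvCost (if ((PySem.List.pyGet? seg ((mid : Int) - 1)).getD (0, 0)).2 ≤ 4 then (0 : Int) else 5)
        (seg.drop mid)
termination_by seg.length
decreasing_by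
  · simp only [List.length_take]; omega
  · simp only [List.length_drop]; omega

def scriptIII_alt (data : List (Int × Int)) : Int :=
  match PySem.List.pyGet? data 0 with
  | none => 0   -- unreachable under Pre_scriptIII: Python raises IndexError at data[0][0]
  | some h => pvCost h.1 data

-- ===== PRECONDITION & SPEC =====
-- Pre_ excludes only the empty list, on which Python A raises IndexError (data[0][0]).
def Pre_scriptIII (data : List (Int × Int)) : Prop := data ≠ []
instance (data : List (Int × Int)) : Decidable (Pre_scriptIII data) := by unfold Pre_scriptIII; infer_instance
def pvWitness_scriptIII : (List (Int × Int)) := [(1, 2)]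

def Spec_scriptIII (data : List (Int × Int)) (out : Int) : Prop := out = scriptIII_alt data
instance (data : List (Int × Int)) (out : Int) : Decidable (Spec_scriptIII data out) := by unfold Spec_scriptIII; infer_instance

-- ===== CLAIM (what is proved, stated in full; the proofs are below) =====
def Claim_equal_scriptIII : Prop := ∀ (data : List (Int × Int)), Dom_scriptIII data → Pre_scriptIII data → Spec_scriptIII data (scriptIII data)

-- ===== LEMMAS AND PROOFS =====

-- reference semantics: the cost of a segment given the carried `previous` value p
def pvSum (p : Int) : List (Int × Int) → Int
  | [] => 0
  | (s, f) :: rest =>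
    let d : Int := if f ≤ 4 then 0 else 5
    (|s - p| + |s - f| + |f - d|) + pvSum d rest

-- the carried value after a segment (p if it is empty, else the default of its last finish)
def pvCarry (p : Int) (xs : List (Int × Int)) : Int :=
  match xs.getLast? with
  | none => p
  | some sf => if sf.2 ≤ 4 then 0 else 5

theorem pvSum_append (xs : List (Int × Int)) : ∀ (ys : List (Int × Int)) (p : Int),
    pvSum p (xs ++ ys) = pvSum p xs + pvSum (pvCarry p xs) ys := by
  induction xs with
  | nil => intro ys p; simp [pvSum, pvCarry]
  | cons hd tl ih =>
    intro ys p
    obtain ⟨s, f⟩ := hd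
    simp only [List.cons_append, pvSum]
    rw [ih]
    have : pvCarry p ((s, f) :: tl) = pvCarry (if f ≤ 4 then 0 else 5) tl := by
      cases tl with
      | nil => simp [pvCarry]
      | cons a l =>
        unfold pvCarry
        rw [List.getLast?_cons_cons]
        cases hl : (a :: l).getLast? with
        | none => exact absurd (List.getLast?_eq_none_iff.mp hl) (by simp)
        | some sf => rfl
    rw [this]
    ring

theorem pvA_foldl (data : List (Int × Int)) : ∀ (acc p : Int),
    (data.foldl
      (fun (st : Int × Int) (sf : Int × Int) =>
        let default : Int := if sf.2 ≤ 4 then 0 else 5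
        let start_off := |sf.1 - st.2|
        let finish_off := |sf.2 - default|
        (st.1 + (start_off + |sf.1 - sf.2| + finish_off), default))
      (acc, p)).1 = acc + pvSum p data := by
  induction data with
  | nil => intro acc p; simp [pvSum]
  | cons hd tl ih =>
    intro acc p
    obtain ⟨s, f⟩ := hd
    simp only [List.foldl_cons, pvSum]
    rw [ih]
    ring

theorem pvCost_eq (n : Nat) : ∀ (seg : List (Int × Int)), seg.length ≤ n → ∀ (p : Int),
    pvCost p seg = pvSum p seg := by
  induction n with
  | zero =>
    intro seg h p
    have : seg = [] := List.eq_nil_of_length_eq_zero (Nat.le_zero.mp h)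
    subst this
    simp [pvCost, pvSum]
  | succ n ih =>
    intro seg h p
    rw [pvCost]
    by_cases h0 : seg.length = 0
    · have : seg = [] := List.eq_nil_of_length_eq_zero h0
      subst this; simp [pvSum]
    · by_cases h1 : seg.length = 1
      · rw [if_neg h0, if_pos h1]
        cases seg with
        | nil => simp at h0
        | cons hd tl =>
          have htl : tl = [] := by
            cases tl with
            | nil => rfl
            | cons a l => simp at h1
          subst htl
          obtain ⟨s, f⟩ := hd
          simp [PySem.List.pyGet?, PySem.List.pyIdx?, pvSum]
      · rw [if_neg h0, if_neg h1]
        simp only []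
        set mid := seg.length / 2 with hmid
        have hm1 : 1 ≤ mid := by omega
        have hmlt : mid < seg.length := by omega
        have htake : seg.take mid ++ seg.drop mid = seg := List.take_append_drop mid seg
        have hlen_take : (seg.take mid).length = mid := by
          simp [List.length_take]; omega
        rw [ih (seg.take mid) (by omega) p,
            ih (seg.drop mid) (by simp [List.length_drop]; omega)]
        -- the seed of the right half is the carry of the left half
        have hkey : (if ((PySem.List.pyGet? seg ((mid : Int) - 1)).getD (0, 0)).2 ≤ 4 then (0 : Int) else 5)
            = pvCarry p (seg.take mid) := by
          have hcast : ((mid : Int) - 1) = ((mid - 1 : Nat) : Int) := by omega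
          rw [hcast, PySem.List.pyGet?_natCast]
          have hget : seg[mid - 1]? = (seg.take mid).getLast? := by
            rw [List.getLast?_eq_getElem?, hlen_take, List.getElem?_take_of_lt (by omega)]
          rw [hget]
          cases hlast : (seg.take mid).getLast? with
          | none =>
            exfalso
            have : seg.take mid = [] := List.getLast?_eq_none_iff.mp hlast
            rw [this] at hlen_take; simp at hlen_take; omega
          | some sf => simp [pvCarry, hlast]
        rw [hkey, ← pvSum_append, htake]

-- ===== VERDICT (by name: the statement is the Claim_ definition above) =====
theorem scriptIII_spec : Claim_equal_scriptIII := by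
  intro data _ hpre
  cases data with
  | nil => exact absurd rfl hpre
  | cons hd tl =>
    obtain ⟨s, f⟩ := hd
    unfold Spec_scriptIII scriptIII scriptIII_alt
    simp only [PySem.List.pyGet?, PySem.List.pyIdx?]
    norm_num
    rw [pvA_foldl, pvCost_eq ((s, f) :: tl).length _ (le_refl _)]
    simp [pvSum]
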